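-- pv_equiv track=rewrite | github.com/KouheiFurukawa/atcoder-back-number | beginners_selection.py | watering
-- ===== SOURCE A (Python) =====
-- def watering(s, count):
--     index_fwd = 10 ** 9
--     index_back = 0
--     for k in range(len(s)):
--         if s[k] > 0:
--             index_fwd = k
--             break
--     if index_fwd == 10 ** 9:
--         return count
--     for l in range(index_fwd, len(s)):
--         if s[l] == 0:
--             break
--         index_back = l
--     for m in range(index_fwd, index_back + 1):
--         s[m] -= 1
--     count += 1
--     return watering(s, count)
-- ===== SOURCE B (Python) =====
-- def watering(s, count):
--     # One left-to-right pass: a watering pass costs max(0, rise) at each climb,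
--     # zeros are hard barriers that reset the previous height, negative cells are
--     # transparent (they never split a watered segment and never finish).
--     # (A also empties the list in place while computing; B leaves s unchanged.)
--     prev = 0
--     for v in s:
--         if v > 0:
--             if v > prev:
--                 count += v - prev
--             prev = v
--         elif v == 0:
--             prev = 0
--     return count
-- ===== Notes on version B (the rewrite author's own statement) =====
-- stated objective: faster
-- what changed: B replaces A's per-watering recursive simulation by one closed-form left-to-right pass that adds the positive rise at each climb, with zeros acting as barriers that reset the previous height and negative cells transparent; B also leaves the list unmutated where A empties it in place.
-- outside the precondition, e.g. on watering([901], 0): A returns 901, B returns 901; on watering([400, 600], 0): A returns 600, B returns 600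
import Mathlib
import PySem

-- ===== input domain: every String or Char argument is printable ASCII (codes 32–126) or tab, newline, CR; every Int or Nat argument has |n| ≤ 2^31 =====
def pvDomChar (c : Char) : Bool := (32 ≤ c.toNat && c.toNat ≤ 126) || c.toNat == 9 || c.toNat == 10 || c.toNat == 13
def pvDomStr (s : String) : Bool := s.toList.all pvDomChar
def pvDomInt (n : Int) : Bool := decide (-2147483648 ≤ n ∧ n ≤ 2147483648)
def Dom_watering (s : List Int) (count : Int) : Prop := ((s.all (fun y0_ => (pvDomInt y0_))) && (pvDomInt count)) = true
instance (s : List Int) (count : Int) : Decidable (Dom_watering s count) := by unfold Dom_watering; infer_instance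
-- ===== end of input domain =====

-- B replaces A's simulation (one recursion per watering pass) by a single left-to-right scan that
-- sums the positive rises between zero barriers, treating negative cells as transparent.
-- A empties the list in place while recursing; B does not mutate s — the equivalence proved here is
-- about the return value only.
-- (A's while-style loops and its top-level recursion are ported with an explicit fuel argument that
-- is provably sufficient; the fuel-exhausted branch is unreachable at the stated fuel.)

-- sum of the positive parts of the list: fuel bound for port A's recursion
def posSum (s : List Int) : Nat := (s.map Int.toNat).sum

-- ===== PORT A =====
-- "for m in range(index_fwd, index_back + 1): s[m] -= 1" (stated for a general step t; A uses t = 1)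
def decRange (s : List Int) (f e : Nat) (t : Int) : List Int :=
  (List.range' f (e - f)).foldl (fun s' m => s'.set m (s'.getD m 0 - t)) s

-- "for k in range(len(s)): if s[k] > 0: index_fwd = k; break" (index_fwd initialised to 10**9)
def loopFwdA (s : List Int) : Nat → Nat → Nat
  | 0, _ => 10 ^ 9
  | g + 1, k => if k < s.length then (if 0 < s.getD k 0 then k else loopFwdA s g (k + 1)) else 10 ^ 9

def loopFwd (s : List Int) (k : Nat) : Nat := loopFwdA s (s.length + 1) k

-- "for l in range(index_fwd, len(s)): if s[l] == 0: break; index_back = l" (index_back starts at 0)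
def loopBackA (s : List Int) : Nat → Nat → Nat → Nat
  | 0, _, back => back
  | g + 1, l, back =>
    if l < s.length then (if s.getD l 0 = 0 then back else loopBackA s g (l + 1) l) else back

def loopBack (s : List Int) (l back : Nat) : Nat := loopBackA s (s.length + 1) l back

def wateringA : Nat → List Int → Int → Int
  | 0, _, c => c
  | g + 1, s, count =>
    let index_fwd := loopFwd s 0
    if index_fwd = 10 ^ 9 then count
    else
      let index_back := loopBack s index_fwd 0
      wateringA g (decRange s index_fwd (index_back + 1) 1) (count + 1)

def watering (s : List Int) (count : Int) : Int := wateringA (posSum s + 1) s count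

-- ===== PORT B =====
-- "for v in s: if v > 0: (if v > prev: count += v - prev); prev = v; elif v == 0: prev = 0"
def passF : List Int → Int → Int → Int
  | [], _, count => count
  | v :: vs, prev, count =>
    if 0 < v then passF vs v (if prev < v then count + (v - prev) else count)
    else if v = 0 then passF vs 0 count
    else passF vs prev count

def watering_alt (s : List Int) (count : Int) : Int := passF s 0 count

-- ===== PRECONDITION & SPEC =====
-- Pre_ excludes (i) lists whose total positive mass exceeds 900: Python A recurses once per
-- watering and the number of waterings can reach that mass, so larger inputs can exhaust CPython's
-- recursion limit (RecursionError); (ii) lists longer than 10**9, where A's in-band sentinel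
-- 10**9 makes a genuine first positive index at 10**9 indistinguishable from 'no positive found'.
def Pre_watering (s : List Int) (count : Int) : Prop :=
  (s.map Int.toNat).sum ≤ 900 ∧ s.length ≤ 10 ^ 9
instance (s : List Int) (count : Int) : Decidable (Pre_watering s count) := by
  unfold Pre_watering; infer_instance

def pvWitness_watering : List Int × Int := ([2, -1, 3, 0, 1], 4)

def Spec_watering (s : List Int) (count : Int) (out : Int) : Prop := out = watering_alt s count
instance (s : List Int) (count : Int) (out : Int) : Decidable (Spec_watering s count out) := by
  unfold Spec_watering; infer_instance

-- ===== CLAIM (what is proved, stated in full; the proofs are below) =====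
def Claim_equal_watering : Prop := ∀ (s : List Int) (count : Int), Dom_watering s count → Pre_watering s count → Spec_watering s count (watering s count)

-- ===== LEMMAS AND PROOFS =====

theorem natSum_set (l : List Nat) (i : Nat) (a : Nat) (h : i < l.length) :
    (l.set i a).sum + l[i] = l.sum + a := by
  induction l generalizing i with
  | nil => simp at h
  | cons x xs ih =>
    cases i with
    | zero => simp [List.set]; omega
    | succ n =>
      have hn : n < xs.length := by simpa using h
      have := ih n hn
      simp [List.set]
      omega

theorem posSum_set_le (s : List Int) (i : Nat) (v : Int)
    (hv : v.toNat ≤ (s.getD i 0).toNat) : posSum (s.set i v) ≤ posSum s := by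
  by_cases h : i < s.length
  · have hm : i < (s.map Int.toNat).length := by simpa using h
    have := natSum_set (s.map Int.toNat) i v.toNat hm
    have hget : (s.map Int.toNat)[i] = (s[i]).toNat := by simp
    have hgd : s.getD i 0 = s[i] := List.getD_eq_getElem s 0 h
    simp only [posSum, List.map_set]
    rw [hgd] at hv
    omega
  · rw [List.set_eq_of_length_le (by omega)]

theorem posSum_set_lt (s : List Int) (i : Nat) (v : Int) (h : i < s.length)
    (hv : v.toNat < (s.getD i 0).toNat) : posSum (s.set i v) < posSum s := by
  have hm : i < (s.map Int.toNat).length := by simpa using h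
  have := natSum_set (s.map Int.toNat) i v.toNat hm
  have hget : (s.map Int.toNat)[i] = (s[i]).toNat := by simp
  have hgd : s.getD i 0 = s[i] := List.getD_eq_getElem s 0 h
  simp only [posSum, List.map_set]
  rw [hgd] at hv
  omega

theorem decFold_posSum_le (t : Int) (ht : 0 ≤ t) :
    ∀ (n f : Nat) (s : List Int),
    posSum ((List.range' f n).foldl (fun s' m => s'.set m (s'.getD m 0 - t)) s) ≤ posSum s := by
  intro n
  induction n with
  | zero => intro f s; simp
  | succ n ih =>
    intro f s
    rw [List.range'_succ, List.foldl_cons]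
    exact le_trans (ih (f + 1) _) (posSum_set_le s f (s.getD f 0 - t) (by omega))

theorem posSum_decRange_lt (s : List Int) (f e : Nat) (t : Int) (hfe : f < e)
    (hfl : f < s.length) (hpos : 0 < s.getD f 0) (ht : 1 ≤ t) :
    posSum (decRange s f e t) < posSum s := by
  unfold decRange
  have hn : e - f = (e - f - 1) + 1 := by omega
  rw [hn, List.range'_succ, List.foldl_cons]
  exact lt_of_le_of_lt (decFold_posSum_le t (by omega) _ _ _)
    (posSum_set_lt s f (s.getD f 0 - t) hfl (by omega))

theorem decFold_getElem? (t : Int) :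
    ∀ (n f : Nat) (s : List Int) (j : Nat),
    ((List.range' f n).foldl (fun s' m => s'.set m (s'.getD m 0 - t)) s)[j]? =
      if f ≤ j ∧ j < f + n then (s[j]?).map (· - t) else s[j]? := by
  intro n
  induction n with
  | zero => intro f s j; rw [if_neg (by omega)]; simp
  | succ n ih =>
    intro f s j
    rw [List.range'_succ, List.foldl_cons, ih]
    by_cases hj : j = f
    · subst hj
      by_cases hl : j < s.length
      · simp [hl]
      · simp [hl]
    · rw [List.getElem?_set]
      simp only [if_neg (by omega : ¬ f = j)]
      by_cases h2 : f ≤ j ∧ j < f + (n + 1)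
      · rw [if_pos (by omega : f + 1 ≤ j ∧ j < f + 1 + n), if_pos h2]
      · rw [if_neg (by omega : ¬(f + 1 ≤ j ∧ j < f + 1 + n)), if_neg h2]

theorem decRange_getElem? (s : List Int) (f e : Nat) (t : Int) (j : Nat) :
    (decRange s f e t)[j]? = if f ≤ j ∧ j < e then (s[j]?).map (· - t) else s[j]? := by
  unfold decRange
  rw [decFold_getElem?]
  by_cases h : f ≤ j ∧ j < e
  · rw [if_pos (by omega), if_pos h]
  · rw [if_neg (by omega), if_neg h]

theorem decFold_length (t : Int) :
    ∀ (n f : Nat) (s : List Int),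
    ((List.range' f n).foldl (fun s' m => s'.set m (s'.getD m 0 - t)) s).length = s.length := by
  intro n
  induction n with
  | zero => intro f s; simp
  | succ n ih =>
    intro f s
    rw [List.range'_succ, List.foldl_cons, ih]
    simp

theorem decRange_length (s : List Int) (f e : Nat) (t : Int) :
    (decRange s f e t).length = s.length :=
  decFold_length t (e - f) f s

theorem decRange_decomp (s : List Int) (f e : Nat) (t : Int) (hfe : f ≤ e) (he : e ≤ s.length) :
    decRange s f e t = s.take f ++ ((s.drop f).take (e - f)).map (· - t) ++ s.drop e := by
  apply List.ext_getElem?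
  intro j
  rw [decRange_getElem?]
  have hlt : (s.take f).length = f := by simp; omega
  have hlm : (((s.drop f).take (e - f)).map (· - t)).length = e - f := by simp; omega
  by_cases h1 : j < f
  · rw [if_neg (by omega)]
    rw [List.getElem?_append_left (by simp; omega)]
    rw [List.getElem?_append_left (by omega)]
    simp [h1]
  · by_cases h2 : j < e
    · rw [if_pos (by omega)]
      rw [List.getElem?_append_left (by simp; omega)]
      rw [List.getElem?_append_right (by omega)]
      rw [hlt]
      simp [List.getElem?_take, List.getElem?_drop]
      rw [if_pos (by omega)]
      congr 1
      congr 1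
      omega
    · rw [if_neg (by omega)]
      rw [List.getElem?_append_right (by simp; omega)]
      simp [List.getElem?_drop, hlt]
      congr 1
      omega

theorem loopFwdA_spec (s : List Int) :
    ∀ (g k : Nat), s.length ≤ k + g →
    (loopFwdA s g k = 10 ^ 9 ∧ ∀ j, k ≤ j → j < s.length → s.getD j 0 ≤ 0) ∨
    (k ≤ loopFwdA s g k ∧ loopFwdA s g k < s.length ∧ 0 < s.getD (loopFwdA s g k) 0 ∧
      ∀ j, k ≤ j → j < loopFwdA s g k → s.getD j 0 ≤ 0) := by
  intro g
  induction g with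
  | zero => intro k hg; exact Or.inl ⟨rfl, fun j h1 h2 => by omega⟩
  | succ g ih =>
    intro k hg
    by_cases hk : k < s.length
    · by_cases hpos : 0 < s.getD k 0
      · rw [loopFwdA, if_pos hk, if_pos hpos]
        exact Or.inr ⟨le_refl _, hk, hpos, fun j h1 h2 => by omega⟩
      · rw [loopFwdA, if_pos hk, if_neg hpos]
        rcases ih (k + 1) (by omega) with ⟨h1, h2⟩ | ⟨h1, h2, h3, h4⟩
        · refine Or.inl ⟨h1, fun j hj hjl => ?_⟩
          rcases Nat.eq_or_lt_of_le hj with rfl | hj'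
          · omega
          · exact h2 j hj' hjl
        · refine Or.inr ⟨by omega, h2, h3, fun j hj hjl => ?_⟩
          rcases Nat.eq_or_lt_of_le hj with rfl | hj'
          · omega
          · exact h4 j hj' hjl
    · rw [loopFwdA, if_neg hk]
      exact Or.inl ⟨rfl, fun j h1 h2 => by omega⟩

theorem loopFwd_spec (s : List Int) (k : Nat) :
    (loopFwd s k = 10 ^ 9 ∧ ∀ j, k ≤ j → j < s.length → s.getD j 0 ≤ 0) ∨
    (k ≤ loopFwd s k ∧ loopFwd s k < s.length ∧ 0 < s.getD (loopFwd s k) 0 ∧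
      ∀ j, k ≤ j → j < loopFwd s k → s.getD j 0 ≤ 0) :=
  loopFwdA_spec s (s.length + 1) k (by omega)

theorem loopBackA_stop (s : List Int) (g l back : Nat)
    (h : l < s.length → s.getD l 0 = 0) : loopBackA s g l back = back := by
  cases g with
  | zero => rfl
  | succ g =>
    by_cases hl : l < s.length
    · rw [loopBackA, if_pos hl, if_pos (h hl)]
    · rw [loopBackA, if_neg hl]

theorem loopBackA_spec (s : List Int) :
    ∀ (g l back : Nat), s.length ≤ l + g → l < s.length → s.getD l 0 ≠ 0 →
    l ≤ loopBackA s g l back ∧ loopBackA s g l back < s.length ∧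
    (∀ j, l ≤ j → j ≤ loopBackA s g l back → s.getD j 0 ≠ 0) ∧
    (loopBackA s g l back + 1 = s.length ∨ s.getD (loopBackA s g l back + 1) 0 = 0) := by
  intro g
  induction g with
  | zero => intro l back hg hl hnz; omega
  | succ g ih =>
    intro l back hg hl hnz
    rw [loopBackA, if_pos hl, if_neg hnz]
    by_cases h1 : l + 1 < s.length
    · by_cases h2 : s.getD (l + 1) 0 = 0
      · rw [loopBackA_stop s g (l + 1) l (fun _ => h2)]
        exact ⟨le_refl _, hl, fun j hj hj' => by rw [show j = l by omega]; exact hnz,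
          Or.inr h2⟩
      · obtain ⟨ih1, ih2, ih3, ih4⟩ := ih (l + 1) l (by omega) h1 h2
        refine ⟨by omega, ih2, fun j hj hj' => ?_, ih4⟩
        rcases Nat.eq_or_lt_of_le hj with rfl | hj2
        · exact hnz
        · exact ih3 j hj2 hj'
    · rw [loopBackA_stop s g (l + 1) l (fun h => absurd h h1)]
      exact ⟨le_refl _, hl, fun j hj hj' => by rw [show j = l by omega]; exact hnz,
        Or.inl (by omega)⟩

theorem loopBack_spec (s : List Int) (l back : Nat) (hl : l < s.length)
    (hnz : s.getD l 0 ≠ 0) :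
    l ≤ loopBack s l back ∧ loopBack s l back < s.length ∧
    (∀ j, l ≤ j → j ≤ loopBack s l back → s.getD j 0 ≠ 0) ∧
    (loopBack s l back + 1 = s.length ∨ s.getD (loopBack s l back + 1) 0 = 0) :=
  loopBackA_spec s (s.length + 1) l back (by omega) hl hnz

-- fuel irrelevance for port A's recursion: any fuel above posSum s computes the same value
theorem wateringA_congr : ∀ (g g' : Nat) (s : List Int) (count : Int),
    posSum s < g → posSum s < g' → wateringA g s count = wateringA g' s count := by
  intro g
  induction g with
  | zero => intro g' s count hg; omega
  | succ g ih =>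
    intro g' s count hg hg'
    cases g' with
    | zero => omega
    | succ g' =>
      rw [wateringA, wateringA]
      simp only
      by_cases hs : loopFwd s 0 = 10 ^ 9
      · rw [if_pos hs, if_pos hs]
      · rw [if_neg hs, if_neg hs]
        rcases loopFwd_spec s 0 with ⟨h1, _⟩ | ⟨_, h2, h3, _⟩
        · exact absurd h1 hs
        · obtain ⟨hb1, _, _, _⟩ := loopBack_spec s (loopFwd s 0) 0 h2 (by omega)
          have hdec : posSum (decRange s (loopFwd s 0) (loopBack s (loopFwd s 0) 0 + 1) 1) < posSum s :=
            posSum_decRange_lt _ _ _ _ (by omega) h2 h3 (by omega)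
          exact ih g' _ _ (by omega) (by omega)

theorem watering_unfold (s : List Int) (count : Int) :
    watering s count =
      if loopFwd s 0 = 10 ^ 9 then count
      else watering (decRange s (loopFwd s 0) (loopBack s (loopFwd s 0) 0 + 1) 1) (count + 1) := by
  unfold watering
  rw [wateringA]
  simp only
  by_cases hs : loopFwd s 0 = 10 ^ 9
  · rw [if_pos hs, if_pos hs]
  · rw [if_neg hs, if_neg hs]
    rcases loopFwd_spec s 0 with ⟨h1, _⟩ | ⟨_, h2, h3, _⟩
    · exact absurd h1 hs
    · obtain ⟨hb1, _, _, _⟩ := loopBack_spec s (loopFwd s 0) 0 h2 (by omega)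
      have hdec : posSum (decRange s (loopFwd s 0) (loopBack s (loopFwd s 0) 0 + 1) 1) < posSum s :=
        posSum_decRange_lt _ _ _ _ (by omega) h2 h3 (by omega)
      exact wateringA_congr _ _ _ _ (by omega) (by omega)

theorem passF_nonpos : ∀ (s : List Int) (prev count : Int),
    (∀ v ∈ s, v ≤ 0) → passF s prev count = count := by
  intro s
  induction s with
  | nil => intro prev count _; rfl
  | cons v vs ih =>
    intro prev count h
    have hv : v ≤ 0 := h v (by simp)
    have ht : ∀ u ∈ vs, u ≤ 0 := fun u hu => h u (by simp [hu])
    rw [passF]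
    rw [if_neg (by omega)]
    by_cases h0 : v = 0
    · rw [if_pos h0]; exact ih 0 count ht
    · rw [if_neg h0]; exact ih prev count ht

theorem passF_prefix : ∀ (P R : List Int) (count : Int),
    (∀ v ∈ P, v ≤ 0) → passF (P ++ R) 0 count = passF R 0 count := by
  intro P
  induction P with
  | nil => intro R count _; rfl
  | cons v vs ih =>
    intro R count h
    have hv : v ≤ 0 := h v (by simp)
    have ht : ∀ u ∈ vs, u ≤ 0 := fun u hu => h u (by simp [hu])
    rw [List.cons_append, passF, if_neg (by omega)]
    by_cases h0 : v = 0
    · rw [if_pos h0]; exact ih R count ht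
    · rw [if_neg h0]; exact ih R count ht

-- scan invariant inside a zero-free run: after the head, the decremented scan trails the original
-- scan by exactly one in 'prev' and has accumulated the same count
theorem passF_run : ∀ (M T : List Int) (p c : Int),
    (∀ v ∈ M, v ≠ 0) → (T = [] ∨ ∃ T', T = 0 :: T') → 1 ≤ p →
    passF (M ++ T) p c = passF (M.map (· - 1) ++ T) (p - 1) c := by
  intro M
  induction M with
  | nil =>
    intro T p c _ hT hp
    rcases hT with rfl | ⟨T', rfl⟩
    · rfl
    · simp only [List.nil_append, List.map_nil]
      rw [passF, passF]
      norm_num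
  | cons v M' ih =>
    intro T p c hM hT hp
    have hv : v ≠ 0 := hM v (by simp)
    have ht : ∀ u ∈ M', u ≠ 0 := fun u hu => hM u (by simp [hu])
    rw [List.map_cons, List.cons_append, List.cons_append, passF, passF]
    by_cases hpos : 0 < v
    · rw [if_pos hpos]
      by_cases h1 : 0 < v - 1
      · rw [if_pos h1]
        have harith : (if p - 1 < v - 1 then c + (v - 1 - (p - 1)) else c) =
            (if p < v then c + (v - p) else c) := by
          by_cases hc : p < v
          · rw [if_pos (by omega), if_pos hc]; ring_nf
          · rw [if_neg (by omega), if_neg hc]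
        rw [harith]
        have := ih T v (if p < v then c + (v - p) else c) ht hT (by omega)
        simpa using this
      · -- v = 1: the head becomes the new zero barrier on the decremented side
        have hv1 : v = 1 := by omega
        subst hv1
        norm_num
        rw [if_neg (by omega : ¬ p < 1)]
        have := ih T 1 c ht hT (by omega)
        simpa using this
    · -- v < 0: transparent on both sides
      rw [if_neg (by omega), if_neg hv, if_neg (by omega : ¬ 0 < v - 1),
        if_neg (by omega : ¬ v - 1 = 0)]
      exact ih T p c ht hT hp

-- one watering pass over the leftmost run costs exactly 1 in the scan
theorem passF_step (x : Int) (M' T : List Int) (count : Int) (hx : 0 < x)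
    (hM' : ∀ u ∈ M', u ≠ 0) (hT : T = [] ∨ ∃ T', T = 0 :: T') :
    passF (((x - 1) :: M'.map (· - 1)) ++ T) 0 (count + 1) = passF ((x :: M') ++ T) 0 count := by
  rw [List.cons_append, List.cons_append, passF, passF]
  rw [if_pos hx, if_pos (by omega : (0 : Int) < x)]
  by_cases h1 : 0 < x - 1
  · rw [if_pos h1, if_pos (by omega : (0 : Int) < x - 1)]
    have harith : count + 1 + (x - 1 - 0) = count + (x - 0) := by ring
    rw [harith]
    exact (passF_run M' T x (count + (x - 0)) hM' hT (by omega)).symm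
  · have hx1 : x = 1 := by omega
    subst hx1
    norm_num
    exact (passF_run M' T 1 (count + 1) hM' hT (by omega)).symm

theorem mainEq : ∀ (n : Nat) (s : List Int) (count : Int), posSum s = n →
    s.length ≤ 10 ^ 9 → watering s count = passF s 0 count := by
  intro n
  induction n using Nat.strong_induction_on with
  | _ n IH =>
    intro s count hn hlen
    by_cases hfw : loopFwd s 0 = 10 ^ 9
    · rw [watering_unfold, if_pos hfw]
      have hall : ∀ v ∈ s, v ≤ 0 := by
        rcases loopFwd_spec s 0 with ⟨_, h2⟩ | ⟨_, r2, _, _⟩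
        · intro v hv
          obtain ⟨i, hi, rfl⟩ := List.mem_iff_getElem.mp hv
          have := h2 i (Nat.zero_le _) hi
          rwa [List.getD_eq_getElem s 0 hi] at this
        · omega
      exact (passF_nonpos s 0 count hall).symm
    · rcases loopFwd_spec s 0 with ⟨h1, _⟩ | ⟨_, hf1, hf2, hf4⟩
      · exact absurd h1 hfw
      obtain ⟨hb1, hb2, hb3, hb4⟩ := loopBack_spec s (loopFwd s 0) 0 hf1 (by omega)
      rw [watering_unfold, if_neg hfw]
      set f := loopFwd s 0 with hfdef
      set b := loopBack s f 0 with hbdef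
      have hdec : posSum (decRange s f (b + 1) 1) < n := by
        rw [← hn]
        exact posSum_decRange_lt s f (b + 1) 1 (by omega) hf1 hf2 (by omega)
      rw [IH _ hdec _ (count + 1) rfl (by rw [decRange_length]; exact hlen)]
      -- decompose s into prefix ++ (head :: rest of the run) ++ tail
      have hgf : s.getD f 0 = s[f] := List.getD_eq_getElem s 0 hf1
      have hdropf : s.drop f = s[f] :: s.drop (f + 1) := List.drop_eq_getElem_cons hf1
      have htake : (s.drop f).take (b + 1 - f) = s[f] :: (s.drop (f + 1)).take (b - f) := by
        rw [hdropf, show b + 1 - f = (b - f) + 1 by omega, List.take_succ_cons]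
      have hP : ∀ v ∈ s.take f, v ≤ 0 := by
        intro v hv
        obtain ⟨i, hi, rfl⟩ := List.mem_iff_getElem.mp hv
        rw [List.getElem_take]
        have hif : i < f := by simp at hi; omega
        have := hf4 i (Nat.zero_le _) hif
        rwa [List.getD_eq_getElem s 0 (by omega)] at this
      have hM' : ∀ u ∈ (s.drop (f + 1)).take (b - f), u ≠ 0 := by
        intro u hu
        obtain ⟨i, hi, rfl⟩ := List.mem_iff_getElem.mp hu
        rw [List.getElem_take, List.getElem_drop]
        have hib : i < b - f := by simp at hi; omega
        have := hb3 (f + 1 + i) (by omega) (by omega)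
        rwa [List.getD_eq_getElem s 0 (by omega)] at this
      have hT : s.drop (b + 1) = [] ∨ ∃ T', s.drop (b + 1) = 0 :: T' := by
        by_cases hbl : b + 1 < s.length
        · refine Or.inr ⟨s.drop (b + 2), ?_⟩
          have hz : s[b + 1] = 0 := by
            rcases hb4 with h | h
            · omega
            · rwa [List.getD_eq_getElem s 0 hbl] at h
          rw [List.drop_eq_getElem_cons hbl, hz]
        · left
          rw [List.drop_eq_nil_iff]
          omega
      have hs : s = s.take f ++ (s.drop f).take (b + 1 - f) ++ s.drop (b + 1) := by
        conv_lhs => rw [← List.take_append_drop f s]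
        rw [List.append_assoc]
        congr 1
        conv_lhs => rw [← List.take_append_drop (b + 1 - f) (s.drop f)]
        congr 1
        rw [List.drop_drop]
        congr 1
        omega
      have hdecomp : decRange s f (b + 1) 1 =
          s.take f ++ ((s.drop f).take (b + 1 - f)).map (· - 1) ++ s.drop (b + 1) :=
        decRange_decomp s f (b + 1) 1 (by omega) (by omega)
      rw [hdecomp, htake, List.map_cons, List.append_assoc, List.cons_append,
        passF_prefix _ _ _ hP]
      conv_rhs => rw [hs, htake, List.append_assoc, List.cons_append,
        passF_prefix _ _ _ hP]
      rw [← List.cons_append, ← List.cons_append]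
      exact passF_step s[f] ((s.drop (f + 1)).take (b - f)) (s.drop (b + 1)) count
        (by rwa [hgf] at hf2) hM' hT

-- ===== VERDICT (by name: the statement is the Claim_ definition above) =====
theorem watering_spec : Claim_equal_watering := by
  intro s count _hdom hpre
  unfold Spec_watering watering_alt
  exact mainEq (posSum s) s count rfl hpre.2
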